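-- pv_equiv track=rewrite | github.com/yushengsu-thu/slime | tools/convert_fsdp_to_hf.py | _strip_best_prefix
-- ===== SOURCE A (Python) =====
-- def _get_candidate_prefixes(keys: list[str]) -> list[str]:
--     predefined = [
--         "model_state.model.",
--         "model_state.",
--         "model.",
--         "module.",
--         "",
--     ]
--
--     detected: set[str] = set()
--     for key in keys:
--         for prefix in predefined:
--             if prefix and key.startswith(prefix):
--                 detected.add(prefix)
--
--     # Always keep empty string as a fall back option for exact match.
--     detected.add("")
--     # Preserve predefined order while keeping only detected prefixes.
--     return [p for p in predefined if p in detected]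
--
-- def _strip_best_prefix(keys: list[str], target_keys: set[str]) -> tuple[str, int]:
--     best_prefix = ""
--     best_match = -1
--
--     for prefix in _get_candidate_prefixes(keys):
--         mapped_keys = {k.removeprefix(prefix) for k in keys}
--         match_count = len(mapped_keys & target_keys)
--         if match_count > best_match:
--             best_match = match_count
--             best_prefix = prefix
--
--     return best_prefix, best_match
-- ===== SOURCE B (Python) =====
-- def _get_candidate_prefixes(keys: list[str]) -> list[str]:
--     predefined = [
--         "model_state.model.",
--         "model_state.",
--         "model.",
--         "module.",
--         "",
--     ]
--
--     detected: set[str] = set()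
--     for key in keys:
--         for prefix in predefined:
--             if prefix and key.startswith(prefix):
--                 detected.add(prefix)
--
--     # Always keep empty string as a fall back option for exact match.
--     detected.add("")
--     # Preserve predefined order while keeping only detected prefixes.
--     return [p for p in predefined if p in detected]
--
--
-- def _strip_best_prefix(keys: list[str], target_keys: set[str]) -> tuple[str, int]:
--     # Target-driven counting: never strips the keys at all.  A target t is
--     # reachable from keys under prefix p iff p+t is a key, or t itself is a
--     # key that does not start with p; count reachable targets per candidate.
--     keyset = set(keys)
--     best_prefix = ""
--     best_match = -1
--     for prefix in _get_candidate_prefixes(keys):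
--         count = 0
--         for t in target_keys:
--             if prefix + t in keyset or (t in keyset and not t.startswith(prefix)):
--                 count += 1
--         if count > best_match:
--             best_match = count
--             best_prefix = prefix
--     return best_prefix, best_match
-- ===== Notes on version B (the rewrite author's own statement) =====
-- stated objective: alternative
-- what changed: A strips every key per candidate prefix and intersects the resulting set with target_keys; B never strips a key: it builds one key set and counts, per candidate prefix p, the targets t for which p+t is a key or t itself is a key not starting with p (a target is matched iff it has a preimage under the strip).
import Mathlib
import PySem

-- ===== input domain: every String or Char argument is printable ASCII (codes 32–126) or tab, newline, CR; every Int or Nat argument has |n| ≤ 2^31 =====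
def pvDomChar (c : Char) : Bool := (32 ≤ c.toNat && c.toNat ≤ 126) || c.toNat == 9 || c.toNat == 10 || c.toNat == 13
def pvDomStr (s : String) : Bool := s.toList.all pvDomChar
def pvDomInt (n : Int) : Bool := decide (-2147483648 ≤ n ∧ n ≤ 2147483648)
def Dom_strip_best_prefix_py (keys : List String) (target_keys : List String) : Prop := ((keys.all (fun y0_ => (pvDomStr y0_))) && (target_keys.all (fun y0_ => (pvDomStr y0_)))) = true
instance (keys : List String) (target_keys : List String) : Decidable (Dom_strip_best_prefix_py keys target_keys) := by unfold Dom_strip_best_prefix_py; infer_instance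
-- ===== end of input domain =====

-- B replaces A's per-prefix "strip every key and intersect with targets" by a
-- target-driven count: for each candidate prefix p a target t is matched iff
-- p+t is a key, or t is a key not starting with p — no key is ever stripped
-- (alternative algorithm, same cost).


-- ===== PORT A =====
-- shared module context: the predefined prefix list and _get_candidate_prefixes
def pvPredefined : List String := ["model_state.model.", "model_state.", "model.", "module.", ""]

-- key.removeprefix(p)  (exact: strip p.toList.length chars iff key starts with p)
def pvStrip (p key : String) : String :=
  if PySem.Str.startswith key p then String.ofList (key.toList.drop p.toList.length) else key

def pvCandidatePrefixes (keys : List String) : List String :=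
  let detected : PySem.Set String :=
    keys.foldl (fun d key =>
      pvPredefined.foldl (fun d pfx =>
        if pfx ≠ "" ∧ PySem.Str.startswith key pfx = true then PySem.Set.add d pfx else d) d)
      PySem.Set.empty
  let detected := PySem.Set.add detected ""
  pvPredefined.filter (fun p => PySem.Set.contains detected p)

def strip_best_prefix_py (keys : List String) (target_keys : List String) : String × Int :=
  (pvCandidatePrefixes keys).foldl
    (fun st pfx =>
      let mapped : PySem.Set String := PySem.Set.ofList (keys.map (pvStrip pfx))
      let matchCount : Int := PySem.Set.len (PySem.Set.inter mapped target_keys)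
      if st.2 < matchCount then (pfx, matchCount) else st)
    ("", -1)

-- ===== PORT B =====
def strip_best_prefix_py_alt (keys : List String) (target_keys : List String) : String × Int :=
  let keyset : PySem.Set String := PySem.Set.ofList keys
  (pvCandidatePrefixes keys).foldl
    (fun st pfx =>
      let count : Int := target_keys.foldl
        (fun c t =>
          if keyset.contains (pfx ++ t) || (keyset.contains t && !(PySem.Str.startswith t pfx))
          then c + 1 else c) 0
      if st.2 < count then (pfx, count) else st)
    ("", -1)

-- ===== PRECONDITION & SPEC =====
-- target_keys is a Python set; under the type convention it is a List of DISTINCT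
-- elements, so Pre_ only states that convention (a list with duplicates represents
-- no Python input — A raises TypeError when handed a list instead of a set).
def Pre_strip_best_prefix_py (keys : List String) (target_keys : List String) : Prop :=
  target_keys.Nodup
instance (keys : List String) (target_keys : List String) : Decidable (Pre_strip_best_prefix_py keys target_keys) := by unfold Pre_strip_best_prefix_py; infer_instance

def pvWitness_strip_best_prefix_py : List String × List String := (["model.a", "b"], ["a", "b"])

def Spec_strip_best_prefix_py (keys : List String) (target_keys : List String) (out : String × Int) : Prop := out = strip_best_prefix_py_alt keys target_keys
instance (keys : List String) (target_keys : List String) (out : String × Int) : Decidable (Spec_strip_best_prefix_py keys target_keys out) := by unfold Spec_strip_best_prefix_py; infer_instance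

-- ===== CLAIM (what is proved, stated in full; the proofs are below) =====
def Claim_equal_strip_best_prefix_py : Prop := ∀ (keys : List String) (target_keys : List String), Dom_strip_best_prefix_py keys target_keys → Pre_strip_best_prefix_py keys target_keys → Spec_strip_best_prefix_py keys target_keys (strip_best_prefix_py keys target_keys)

-- ===== LEMMAS AND PROOFS =====

lemma pvStrip_eq_iff (p k t : String) :
    pvStrip p k = t ↔ (k = p ++ t ∨ (k = t ∧ PySem.Str.startswith k p = false)) := by
  have hext : ∀ a b : String, a = b ↔ a.toList = b.toList := by
    intro a b
    exact ⟨fun h => h ▸ rfl, fun h => by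
      have := congrArg String.ofList h
      simpa using this⟩
  unfold pvStrip
  by_cases h : PySem.Str.startswith k p = true
  · rw [if_pos h]
    rw [PySem.Str.startswith_eq, PySem.Chars.startswith_iff] at h
    obtain ⟨r, hr⟩ := h
    have hdrop : k.toList.drop p.toList.length = r := by rw [← hr]; simp
    constructor
    · intro hs
      left
      rw [hext] at hs ⊢
      simp only [String.toList_ofList, hdrop] at hs
      rw [String.toList_append, ← hr, hs]
    · rintro (rfl | ⟨rfl, hf⟩)
      · rw [hext]
        simp only [String.toList_ofList, String.toList_append]
        simp
      · exfalso
        rw [PySem.Str.startswith_eq] at hf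
        have hsw := (PySem.Chars.startswith_iff k.toList p.toList).2 ⟨r, hr⟩
        rw [hf] at hsw
        exact Bool.false_ne_true hsw
  · rw [if_neg h]
    have hf : PySem.Str.startswith k p = false := by simpa using h
    constructor
    · intro hs
      exact Or.inr ⟨hs, hf⟩
    · rintro (rfl | ⟨rfl, _⟩)
      · exfalso
        apply h
        rw [PySem.Str.startswith_eq, PySem.Chars.startswith_iff, String.toList_append]
        exact ⟨t.toList, rfl⟩
      · rfl

lemma pvMemStrip_iff (p t : String) (keys : List String) :
    (∃ k ∈ keys, pvStrip p k = t) ↔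
      ((p ++ t) ∈ keys ∨ (t ∈ keys ∧ PySem.Str.startswith t p = false)) := by
  constructor
  · rintro ⟨k, hk, hs⟩
    rcases (pvStrip_eq_iff p k t).1 hs with rfl | ⟨rfl, hf⟩
    · exact Or.inl hk
    · exact Or.inr ⟨hk, hf⟩
  · rintro (hk | ⟨hk, hf⟩)
    · exact ⟨p ++ t, hk, (pvStrip_eq_iff p _ t).2 (Or.inl rfl)⟩
    · exact ⟨t, hk, (pvStrip_eq_iff p t t).2 (Or.inr ⟨rfl, hf⟩)⟩

lemma pvFilterLengthComm (l1 l2 : List String) (h1 : l1.Nodup) (h2 : l2.Nodup) :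
    (l1.filter (fun x => decide (x ∈ l2))).length
      = (l2.filter (fun x => decide (x ∈ l1))).length := by
  have hperm : (l1.filter (fun x => decide (x ∈ l2))).Perm
      (l2.filter (fun x => decide (x ∈ l1))) := by
    rw [List.perm_ext_iff_of_nodup (h1.filter _) (h2.filter _)]
    intro a
    simp only [List.mem_filter, decide_eq_true_eq]
    tauto
  exact hperm.length_eq

lemma pvCountAgree (keys tg : List String) (htg : tg.Nodup) (p : String) :
    PySem.Set.len (PySem.Set.inter (PySem.Set.ofList (keys.map (pvStrip p))) tg)
      = tg.foldl
          (fun c t =>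
            if (PySem.Set.ofList keys).contains (p ++ t)
                || ((PySem.Set.ofList keys).contains t && !(PySem.Str.startswith t p))
            then c + 1 else c) 0 := by
  rw [PySem.List.foldl_count_if, zero_add]
  have hcond : ∀ t : String,
      ((PySem.Set.ofList keys).contains (p ++ t)
          || ((PySem.Set.ofList keys).contains t && !(PySem.Str.startswith t p))) = true
        ↔ t ∈ keys.map (pvStrip p) := by
    intro t
    simp only [Bool.or_eq_true, Bool.and_eq_true, Bool.not_eq_true',
      PySem.Set.contains_iff, PySem.Set.mem_ofList]
    rw [← pvMemStrip_iff p t keys, List.mem_map]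
  simp only [PySem.Set.len, PySem.Set.inter]
  congr 1
  calc (List.filter (fun x => PySem.Set.contains tg x)
          (PySem.Set.ofList (keys.map (pvStrip p)))).length
      = (List.filter (fun x => decide (x ∈ tg))
          (PySem.Set.ofList (keys.map (pvStrip p)))).length := by
        congr 1
        apply List.filter_congr
        intro x _
        simp [PySem.Set.contains_eq_listContains]
    _ = (List.filter (fun x => decide (x ∈ PySem.Set.ofList (keys.map (pvStrip p)))) tg).length :=
        pvFilterLengthComm _ _ (PySem.Set.nodup_ofList _) htg
    _ = _ := by
        rw [List.countP_eq_length_filter]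
        congr 1
        apply List.filter_congr
        intro t _
        have h := hcond t
        by_cases hm : t ∈ keys.map (pvStrip p)
        · rw [decide_eq_true ((PySem.Set.mem_ofList _ _).2 hm)]
          exact (h.2 hm).symm
        · have hf : ((PySem.Set.ofList keys).contains (p ++ t)
              || ((PySem.Set.ofList keys).contains t && !(PySem.Str.startswith t p))) = false := by
            rw [← Bool.not_eq_true, h]
            exact hm
          rw [hf, decide_eq_false (fun hx => hm ((PySem.Set.mem_ofList _ _).1 hx))]

-- ===== VERDICT (by name: the statement is the Claim_ definition above) =====
theorem strip_best_prefix_py_spec : Claim_equal_strip_best_prefix_py := by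
  intro keys target_keys _ hpre
  unfold Spec_strip_best_prefix_py strip_best_prefix_py strip_best_prefix_py_alt
  dsimp only
  apply PySem.List.foldl_congr_mem
  intro st p _
  dsimp only
  rw [pvCountAgree keys target_keys hpre p]
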